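-- pv_equiv track=rewrite | github.com/bmad4ever/bmquilting | bmquilting/cphl_fill.py | find_first_2adjacent_all_zero_rows
-- ===== SOURCE A (Python) =====
-- def find_first_2adjacent_all_zero_rows(mask):
--     """return the index of the second all zero row"""
--     prev = False
--     for i, row in enumerate(mask):
--         current = all(pixel == 0 for pixel in row)
--         if prev and current:
--             return i
--         prev = current
--     return None
-- ===== SOURCE B (Python) =====
-- def find_first_2adjacent_all_zero_rows(mask):
--     """return the index of the second all zero row"""
--     zeros = [i for i, row in enumerate(mask) if all(pixel == 0 for pixel in row)]
--     for a, b in zip(zeros, zeros[1:]):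
--         if b == a + 1:
--             return b
--     return None
-- ===== Notes on version B (the rewrite author's own statement) =====
-- stated objective: simpler
-- what changed: Replaces the rolling previous-row boolean flag with a two-pass scheme: first collect the indices of all-zero rows, then scan adjacent pairs of that index list for two consecutive indices.
import Mathlib
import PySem

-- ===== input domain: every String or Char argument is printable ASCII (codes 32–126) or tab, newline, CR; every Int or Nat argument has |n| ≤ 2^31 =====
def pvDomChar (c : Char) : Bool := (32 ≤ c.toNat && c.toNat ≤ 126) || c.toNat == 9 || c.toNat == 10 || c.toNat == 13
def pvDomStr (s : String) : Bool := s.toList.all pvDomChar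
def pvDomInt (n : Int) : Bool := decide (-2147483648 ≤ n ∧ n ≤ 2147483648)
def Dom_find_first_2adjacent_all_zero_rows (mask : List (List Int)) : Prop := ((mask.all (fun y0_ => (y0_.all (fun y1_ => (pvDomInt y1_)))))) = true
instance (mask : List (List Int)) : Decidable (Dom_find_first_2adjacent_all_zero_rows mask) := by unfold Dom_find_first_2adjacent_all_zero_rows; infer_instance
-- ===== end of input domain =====

-- B replaces A's rolling previous-row boolean flag with a two-pass scheme (zero-row index
-- table, then an adjacency scan over it); objective: simpler decomposition, same cost.
-- ===== PORT A =====
def pvLoopA : Bool → Int → List (List Int) → Option Int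
  | _, _, [] => none
  | prev, i, row :: rest =>
    let current := row.all (fun pixel => pixel == 0)
    if prev && current then some i else pvLoopA current (i + 1) rest

def find_first_2adjacent_all_zero_rows (mask : List (List Int)) : Option Int :=
  pvLoopA false 0 mask

-- ===== PORT B =====
-- the 'for a, b in zip(zeros, zeros[1:])' loop of Source B
def pvScanPairs : List Int → Option Int
  | a :: b :: rest => if b = a + 1 then some b else pvScanPairs (b :: rest)
  | _ => none

def find_first_2adjacent_all_zero_rows_alt (mask : List (List Int)) : Option Int :=
  let zeros := ((PySem.List.enumerate mask).filter
      (fun p => p.2.all (fun pixel => pixel == 0))).map (fun p => p.1)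
  pvScanPairs zeros

-- ===== PRECONDITION & SPEC =====
def Spec_find_first_2adjacent_all_zero_rows (mask : List (List Int)) (out : Option Int) : Prop := out = find_first_2adjacent_all_zero_rows_alt mask
instance (mask : List (List Int)) (out : Option Int) : Decidable (Spec_find_first_2adjacent_all_zero_rows mask out) := by unfold Spec_find_first_2adjacent_all_zero_rows; infer_instance

-- ===== CLAIM (what is proved, stated in full; the proofs are below) =====
def Claim_equal_find_first_2adjacent_all_zero_rows : Prop := ∀ (mask : List (List Int)), Dom_find_first_2adjacent_all_zero_rows mask → Spec_find_first_2adjacent_all_zero_rows mask (find_first_2adjacent_all_zero_rows mask)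

-- ===== LEMMAS AND PROOFS =====

-- indices of all-zero rows of `rows`, counting from `i` (proof-only helper)
def pvZerosFrom (i : Int) : List (List Int) → List Int
  | [] => []
  | row :: rest =>
    if row.all (fun pixel => pixel == 0) then i :: pvZerosFrom (i + 1) rest
    else pvZerosFrom (i + 1) rest

-- B's pair scan with an explicit "last zero index" state (proof-only helper)
def pvPairScan : Option Int → List Int → Option Int
  | _, [] => none
  | p, z :: rest => if p = some (z - 1) then some z else pvPairScan (some z) rest

theorem pvZeros_enum (mask : List (List Int)) (i : Int) :
    ((PySem.List.enumerate mask i).filter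
      (fun p => p.2.all (fun pixel => pixel == 0))).map (fun p => p.1) = pvZerosFrom i mask := by
  induction mask generalizing i with
  | nil => simp [PySem.List.enumerate_nil, pvZerosFrom]
  | cons row rest ih =>
    simp only [PySem.List.enumerate_cons, List.filter_cons, pvZerosFrom]
    by_cases h : row.all (fun pixel => pixel == 0) <;> simp [h, ih]

theorem pvScanPairs_eq (a : Int) (l : List Int) :
    pvScanPairs (a :: l) = pvPairScan (some a) l := by
  induction l generalizing a with
  | nil => simp [pvScanPairs, pvPairScan]
  | cons b rest ih =>
    simp only [pvScanPairs, pvPairScan, ih]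
    have heq : (b = a + 1) ↔ (some a = some (b - 1)) := by
      constructor <;> intro h
      · simp; omega
      · injection h with h; omega
    by_cases h : b = a + 1
    · rw [if_pos h, if_pos (heq.mp h)]
    · rw [if_neg h, if_neg (fun hh => h (heq.mpr hh))]

theorem pvPairScan_none (l : List Int) : pvPairScan none l = pvScanPairs l := by
  cases l with
  | nil => rfl
  | cons a rest => simp [pvPairScan, pvScanPairs_eq]

theorem pvMain (rows : List (List Int)) :
    ∀ (i : Int) (prev : Bool) (p : Option Int),
      (prev = true → p = some (i - 1)) →
      (prev = false → ∀ z, p = some z → z + 1 < i) →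
      pvLoopA prev i rows = pvPairScan p (pvZerosFrom i rows) := by
  induction rows with
  | nil => intro i prev p _ _; simp [pvLoopA, pvZerosFrom, pvPairScan]
  | cons row rest ih =>
    intro i prev p ht hf
    simp only [pvLoopA, pvZerosFrom]
    by_cases hc : row.all (fun pixel => pixel == 0)
    · simp only [hc, if_pos, Bool.and_true]
      cases prev with
      | true =>
        have hp := ht rfl
        simp [pvPairScan, hp]
      | false =>
        have hne : ¬ (p = some (i - 1)) := by
          intro h
          have := hf rfl (i - 1) h
          omega
        simp only [Bool.false_eq_true, if_false, pvPairScan, if_neg hne]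
        exact ih (i + 1) true (some i) (fun _ => by congr 1; omega) (by simp)
    · have hf' : ∀ z, p = some z → z + 1 < i + 1 := by
        intro z hz
        cases prev with
        | true => have := ht rfl; rw [this] at hz; injection hz with h; omega
        | false => have := hf rfl z hz; omega
      simp only [hc, Bool.and_false, Bool.false_eq_true, if_false]
      exact ih (i + 1) false p (by simp) (fun _ => hf')

-- ===== VERDICT (by name: the statement is the Claim_ definition above) =====
theorem find_first_2adjacent_all_zero_rows_spec : Claim_equal_find_first_2adjacent_all_zero_rows := by
  intro mask _
  unfold Spec_find_first_2adjacent_all_zero_rows find_first_2adjacent_all_zero_rows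
    find_first_2adjacent_all_zero_rows_alt
  rw [pvZeros_enum, pvMain mask 0 false none (by simp) (by simp), pvPairScan_none]
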